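-- pv_equiv track=rewrite | github.com/JulianKarrer/brainfuck-txt | translate.py | findTwoAverages
-- ===== SOURCE A (Python) =====
-- def findTwoAverages(text:str)->tuple[int]:
--     """Given a text, returns two values a<b such that the variance of any char in the text
--     to either a or b is as low as possible"""
--     histogram = {}
--     for c in text:
--         if ord(c) in histogram:
--             histogram[ord(c)] += 1
--         else:
--             histogram[ord(c)] = 1
--
--     minvar = 99999999999
--     best_tuple = (0,0)
--     for x in range(0x7f):
--         for y in range(0x7f):
--             if x<y:
--                 variance = sum([ min(val * abs(key-x), val * abs(key-y)) for key,val in histogram.items() ])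
--                 if variance < minvar:
--                     minvar = variance
--                     best_tuple = x,y
--     return best_tuple
-- ===== SOURCE B (Python) =====
-- def findTwoAverages(text:str)->tuple[int]:
--     """Given a text, returns two values a<b such that the variance of any char in the text
--     to either a or b is as low as possible"""
--     # count codes, then prefix sums: C[j] = chars with code < j, W[j] = sum of code over chars with code < j
--     cnt = [0]*127
--     for c in text:
--         cnt[ord(c)] += 1
--     C = [0]
--     W = [0]
--     for k in range(127):
--         C.append(C[k] + cnt[k])
--         W.append(W[k] + cnt[k]*k)
--     minvar = 99999999999
--     best_tuple = (0,0)
--     for x in range(127):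
--         for y in range(x+1, 127):
--             m = (x+y)//2  # codes <= m are nearer to x (ties cost the same either way)
--             variance = (x*C[x] - W[x]) \
--                 + (W[m+1] - W[x] - x*(C[m+1] - C[x])) \
--                 + (y*(C[y] - C[m+1]) - (W[y] - W[m+1])) \
--                 + (W[127] - W[y] - y*(C[127] - C[y]))
--             if variance < minvar:
--                 minvar = variance
--                 best_tuple = x,y
--     return best_tuple
-- ===== Notes on version B (the rewrite author's own statement) =====
-- stated objective: faster
-- what changed: Replaces the per-pair scan over all histogram entries by prefix-sum arrays over code points, so each candidate pair's cost is computed in O(1) from four interval sums split at the midpoint instead of a min over every distinct character (up to 127 of them).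
import Mathlib
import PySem

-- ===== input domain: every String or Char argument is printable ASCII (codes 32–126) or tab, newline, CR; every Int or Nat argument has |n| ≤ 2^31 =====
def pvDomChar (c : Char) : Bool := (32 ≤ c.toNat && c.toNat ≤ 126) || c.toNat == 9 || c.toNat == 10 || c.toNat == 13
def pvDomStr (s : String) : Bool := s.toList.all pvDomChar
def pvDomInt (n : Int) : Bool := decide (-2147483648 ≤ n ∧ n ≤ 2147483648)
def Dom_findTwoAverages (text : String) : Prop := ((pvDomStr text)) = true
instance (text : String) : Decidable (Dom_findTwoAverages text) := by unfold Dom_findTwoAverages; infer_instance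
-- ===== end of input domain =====

-- B replaces A's per-pair min-scan over the histogram by prefix-sum arrays over code points,
-- computing each pair's cost in O(1) from four interval sums split at the midpoint (measured faster).

-- ===== PORT A =====
-- shared trivial helper: 'return best_tuple' (second component of the loop state)
def pySnd (p : Int × (Int × Int)) : Int × Int := p.2

def findTwoAverages (text : String) : Int × Int :=
  let histogram := text.toList.foldl (fun d c =>
      if d.contains ((c.toNat : Int)) then
        d.insert (c.toNat : Int) (d.getD (c.toNat : Int) 0 + 1)
      else
        d.insert (c.toNat : Int) 1) (PySem.Dict.empty : PySem.Dict Int Int)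
  let res := (PySem.List.pyRange 0 127 1).foldl (fun (s : Int × (Int × Int)) x =>
      (PySem.List.pyRange 0 127 1).foldl (fun (s : Int × (Int × Int)) y =>
        if x < y then
          let variance := (histogram.items.map
              (fun kv => min (kv.2 * |kv.1 - x|) (kv.2 * |kv.1 - y|))).sum
          if variance < s.1 then (variance, (x, y)) else s
        else s) s) ((99999999999 : Int), ((0 : Int), (0 : Int)))
  pySnd res

-- ===== PORT B =====
def findTwoAverages_alt (text : String) : Int × Int :=
  let cnt := text.toList.foldl (fun a c =>
      a.set c.toNat (PySem.List.pyGetD a (c.toNat : Int) 0 + 1)) (List.replicate 127 (0 : Int))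
  let CW := (PySem.List.pyRange 0 127 1).foldl (fun (cw : List Int × List Int) k =>
      (cw.1 ++ [PySem.List.pyGetD cw.1 k 0 + PySem.List.pyGetD cnt k 0],
       cw.2 ++ [PySem.List.pyGetD cw.2 k 0 + PySem.List.pyGetD cnt k 0 * k])) ([0], [0])
  let C := CW.1
  let W := CW.2
  let res := (PySem.List.pyRange 0 127 1).foldl (fun (s : Int × (Int × Int)) x =>
      (PySem.List.pyRange (x + 1) 127 1).foldl (fun (s : Int × (Int × Int)) y =>
        let m := PySem.Int.floordiv (x + y) 2
        let variance :=
          (x * PySem.List.pyGetD C x 0 - PySem.List.pyGetD W x 0)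
          + (PySem.List.pyGetD W (m + 1) 0 - PySem.List.pyGetD W x 0
              - x * (PySem.List.pyGetD C (m + 1) 0 - PySem.List.pyGetD C x 0))
          + (y * (PySem.List.pyGetD C y 0 - PySem.List.pyGetD C (m + 1) 0)
              - (PySem.List.pyGetD W y 0 - PySem.List.pyGetD W (m + 1) 0))
          + (PySem.List.pyGetD W 127 0 - PySem.List.pyGetD W y 0
              - y * (PySem.List.pyGetD C 127 0 - PySem.List.pyGetD C y 0))
        if variance < s.1 then (variance, (x, y)) else s) s)
      ((99999999999 : Int), ((0 : Int), (0 : Int)))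
  pySnd res

-- ===== PRECONDITION & SPEC =====
def Spec_findTwoAverages (text : String) (out : Int × Int) : Prop := out = findTwoAverages_alt text
instance (text : String) (out : Int × Int) : Decidable (Spec_findTwoAverages text out) := by unfold Spec_findTwoAverages; infer_instance

-- ===== CLAIM (what is proved, stated in full; the proofs are below) =====
def Claim_equal_findTwoAverages : Prop := ∀ (text : String), Dom_findTwoAverages text → Spec_findTwoAverages text (findTwoAverages text)

-- ===== LEMMAS AND PROOFS =====

-- proof-only abbreviations
def pvOrd (text : String) : List Int := text.toList.map (fun c => (c.toNat : Int))
def pvCnt (xs : List Int) (k : Int) : Int := (xs.count k : Int)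
def pvS (xs : List Int) (j : Int) : Int := ((PySem.List.pyRange 0 j 1).map (pvCnt xs)).sum
def pvT (xs : List Int) (j : Int) : Int := ((PySem.List.pyRange 0 j 1).map (fun k => pvCnt xs k * k)).sum

-- proof-side names for the ports' intermediate values
def pvHistD (text : String) : PySem.Dict Int Int :=
  text.toList.foldl (fun d c =>
      if d.contains ((c.toNat : Int)) then
        d.insert (c.toNat : Int) (d.getD (c.toNat : Int) 0 + 1)
      else
        d.insert (c.toNat : Int) 1) (PySem.Dict.empty : PySem.Dict Int Int)

def pvCntD (text : String) : List Int :=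
  text.toList.foldl (fun a c =>
      a.set c.toNat (PySem.List.pyGetD a (c.toNat : Int) 0 + 1)) (List.replicate 127 (0 : Int))

def pvCWD (text : String) : List Int × List Int :=
  (PySem.List.pyRange 0 127 1).foldl (fun (cw : List Int × List Int) k =>
      (cw.1 ++ [PySem.List.pyGetD cw.1 k 0 + PySem.List.pyGetD (pvCntD text) k 0],
       cw.2 ++ [PySem.List.pyGetD cw.2 k 0 + PySem.List.pyGetD (pvCntD text) k 0 * k])) ([0], [0])

lemma pv_lin_sub (l : List Int) (f : Int → Int) (t : Int) :
    (l.map (fun k => f k * (k - t))).sum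
      = (l.map (fun k => f k * k)).sum - t * (l.map f).sum := by
  induction l with
  | nil => simp
  | cons a l ih => simp [ih]; ring

lemma pv_lin_sub' (l : List Int) (f : Int → Int) (t : Int) :
    (l.map (fun k => f k * (t - k))).sum
      = t * (l.map f).sum - (l.map (fun k => f k * k)).sum := by
  induction l with
  | nil => simp
  | cons a l ih => simp [ih]; ring

lemma pv_seg_S (xs : List Int) (a b : Int) (h0 : 0 ≤ a) (hab : a ≤ b) :
    ((PySem.List.pyRange a b 1).map (pvCnt xs)).sum = pvS xs b - pvS xs a := by
  have h := PySem.List.pyRange_one_append 0 a b h0 hab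
  unfold pvS
  rw [h, List.map_append, List.sum_append]
  ring

lemma pv_seg_T (xs : List Int) (a b : Int) (h0 : 0 ≤ a) (hab : a ≤ b) :
    ((PySem.List.pyRange a b 1).map (fun k => pvCnt xs k * k)).sum = pvT xs b - pvT xs a := by
  have h := PySem.List.pyRange_one_append 0 a b h0 hab
  unfold pvT
  rw [h, List.map_append, List.sum_append]
  ring

-- A's per-pair sum over all code points equals B's prefix-sum expression
lemma pv_varA_closed (xs : List Int) (x y m : Int) (hx : 0 ≤ x) (hxy : x < y) (hy : y < 127)
    (hm : m = PySem.Int.floordiv (x + y) 2) :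
    ((PySem.List.pyRange 0 127 1).map
        (fun k => min (pvCnt xs k * |k - x|) (pvCnt xs k * |k - y|))).sum
      = (x * pvS xs x - pvT xs x)
        + (pvT xs (m + 1) - pvT xs x - x * (pvS xs (m + 1) - pvS xs x))
        + (y * (pvS xs y - pvS xs (m + 1)) - (pvT xs y - pvT xs (m + 1)))
        + (pvT xs 127 - pvT xs y - y * (pvS xs 127 - pvS xs y)) := by
  have hcn : ∀ k, 0 ≤ pvCnt xs k := fun k => Int.natCast_nonneg _
  have hm0 : 2 * m ≤ x + y ∧ x + y ≤ 2 * m + 1 := by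
    rw [hm]; unfold PySem.Int.floordiv
    rw [Int.fdiv_eq_ediv]
    simp only [show ((0:Int) ≤ 2 ∨ (2:Int) ∣ (x + y)) from Or.inl (by omega), if_pos]
    omega
  rw [PySem.List.pyRange_one_append 0 x 127 (by omega) (by omega),
      PySem.List.pyRange_one_append x (m + 1) 127 (by omega) (by omega),
      PySem.List.pyRange_one_append (m + 1) y 127 (by omega) (by omega)]
  simp only [List.map_append, List.sum_append]
  have hc1 : (PySem.List.pyRange 0 x 1).map
        (fun k => min (pvCnt xs k * |k - x|) (pvCnt xs k * |k - y|))
      = (PySem.List.pyRange 0 x 1).map (fun k => pvCnt xs k * (x - k)) := by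
    apply List.map_congr_left; intro k hk
    have hb := (PySem.List.mem_pyRange_one).1 hk
    rw [show |k - x| = x - k by rw [abs_of_nonpos (by omega)]; omega,
        show |k - y| = y - k by rw [abs_of_nonpos (by omega)]; omega,
        min_eq_left (mul_le_mul_of_nonneg_left (by omega) (hcn k))]
  have hc2 : (PySem.List.pyRange x (m + 1) 1).map
        (fun k => min (pvCnt xs k * |k - x|) (pvCnt xs k * |k - y|))
      = (PySem.List.pyRange x (m + 1) 1).map (fun k => pvCnt xs k * (k - x)) := by
    apply List.map_congr_left; intro k hk
    have hb := (PySem.List.mem_pyRange_one).1 hk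
    rw [show |k - x| = k - x by rw [abs_of_nonneg (by omega)],
        show |k - y| = y - k by rw [abs_of_nonpos (by omega)]; omega,
        min_eq_left (mul_le_mul_of_nonneg_left (by omega) (hcn k))]
  have hc3 : (PySem.List.pyRange (m + 1) y 1).map
        (fun k => min (pvCnt xs k * |k - x|) (pvCnt xs k * |k - y|))
      = (PySem.List.pyRange (m + 1) y 1).map (fun k => pvCnt xs k * (y - k)) := by
    apply List.map_congr_left; intro k hk
    have hb := (PySem.List.mem_pyRange_one).1 hk
    rw [show |k - x| = k - x by rw [abs_of_nonneg (by omega)],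
        show |k - y| = y - k by rw [abs_of_nonpos (by omega)]; omega,
        min_eq_right (mul_le_mul_of_nonneg_left (by omega) (hcn k))]
  have hc4 : (PySem.List.pyRange y 127 1).map
        (fun k => min (pvCnt xs k * |k - x|) (pvCnt xs k * |k - y|))
      = (PySem.List.pyRange y 127 1).map (fun k => pvCnt xs k * (k - y)) := by
    apply List.map_congr_left; intro k hk
    have hb := (PySem.List.mem_pyRange_one).1 hk
    rw [show |k - x| = k - x by rw [abs_of_nonneg (by omega)],
        show |k - y| = k - y by rw [abs_of_nonneg (by omega)],
        min_eq_right (mul_le_mul_of_nonneg_left (by omega) (hcn k))]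
  rw [hc1, hc2, hc3, hc4, pv_lin_sub', pv_lin_sub, pv_lin_sub', pv_lin_sub,
      pv_seg_S xs 0 x (by omega) (by omega), pv_seg_T xs 0 x (by omega) (by omega),
      pv_seg_S xs x (m + 1) (by omega) (by omega), pv_seg_T xs x (m + 1) (by omega) (by omega),
      pv_seg_S xs (m + 1) y (by omega) (by omega), pv_seg_T xs (m + 1) y (by omega) (by omega),
      pv_seg_S xs y 127 (by omega) (by omega), pv_seg_T xs y 127 (by omega) (by omega)]
  have h0S : pvS xs 0 = 0 := by unfold pvS; rw [PySem.List.pyRange_one_eq_nil (by omega)]; simp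
  have h0T : pvT xs 0 = 0 := by unfold pvT; rw [PySem.List.pyRange_one_eq_nil (by omega)]; simp
  rw [h0S, h0T]
  ring

-- sum of a function vanishing off xs over the deduped keys = sum over all code points
lemma pv_sum_ofList (xs : List Int) (G : Int → Int)
    (hk : ∀ k ∈ xs, 0 ≤ k ∧ k < 127) (h0 : ∀ k, k ∉ xs → G k = 0) :
    ((PySem.Set.ofList xs).map G).sum = ((PySem.List.pyRange 0 127 1).map G).sum := by
  have hperm : ((PySem.List.pyRange 0 127 1).filter (fun k => decide (k ∈ xs))).Perm
      (PySem.Set.ofList xs) := by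
    apply List.perm_of_nodup_nodup_toFinset_eq
    · exact (PySem.List.nodup_pyRange_one _ _).filter _
    · exact PySem.Set.nodup_ofList xs
    · ext k
      simp only [List.mem_toFinset, List.mem_filter, decide_eq_true_eq,
        PySem.Set.mem_ofList, PySem.List.mem_pyRange_one]
      constructor
      · rintro ⟨_, h⟩; exact h
      · intro h; exact ⟨by exact_mod_cast hk k h, h⟩
  have hsplit : (((PySem.List.pyRange 0 127 1).filter (fun k => decide (k ∈ xs)))
        ++ ((PySem.List.pyRange 0 127 1).filter (fun k => !decide (k ∈ xs)))).Perm
      (PySem.List.pyRange 0 127 1) := List.filter_append_perm _ _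
  rw [← (hsplit.map G).sum_eq, List.map_append, List.sum_append,
    (hperm.map G).sum_eq]
  have hzero : (((PySem.List.pyRange 0 127 1).filter (fun k => !decide (k ∈ xs))).map G).sum = 0 := by
    apply List.sum_eq_zero
    intro v hv
    obtain ⟨k, hk', rfl⟩ := List.mem_map.1 hv
    exact h0 k (by simpa using (List.mem_filter.1 hk').2)
  rw [hzero]
  ring

-- A's histogram loop is a counter over the code points
lemma pv_hist_eq (text : String) : pvHistD text = PySem.Dict.counter (pvOrd text) := by
  unfold pvHistD pvOrd
  rw [← PySem.Dict.foldl_insert_getD_add_one_eq_counter, List.foldl_map]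
  apply PySem.List.foldl_congr_mem
  intro d c _
  by_cases h : d.contains ((c.toNat : Int))
  · simp [h]
  · rw [PySem.Dict.getD_of_not_contains _ _ (by simpa using h)]
    simp [h]

lemma pv_count_map (cs : List Char) (j : Nat) :
    (cs.map (fun c => (c.toNat : Int))).count (j : Int) = cs.countP (fun c => c.toNat == j) := by
  rw [List.count_eq_countP, List.countP_map]
  apply List.countP_congr; intro c _
  simp

-- B's counting-array loop
lemma pv_cnt_fold (cs : List Char) (base : List Int) (hlen : base.length = 127)
    (hc : ∀ c ∈ cs, c.toNat < 127) :
    (cs.foldl (fun a c => a.set c.toNat (PySem.List.pyGetD a (c.toNat : Int) 0 + 1)) base).length = 127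
    ∧ ∀ j : Nat, j < 127 →
      (cs.foldl (fun a c => a.set c.toNat (PySem.List.pyGetD a (c.toNat : Int) 0 + 1)) base).getD j 0
        = base.getD j 0 + (cs.countP (fun c => c.toNat == j) : Int) := by
  induction cs generalizing base with
  | nil => exact ⟨hlen, fun j _ => by simp⟩
  | cons c cs ih =>
    rw [List.foldl_cons, show PySem.List.pyGetD base ((c.toNat : Int)) 0 = base.getD c.toNat 0 by simp]
    have hcj : c.toNat < 127 := hc c (List.mem_cons_self)
    have hlen' : (base.set c.toNat (base.getD c.toNat 0 + 1)).length = 127 := by simp [hlen]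
    obtain ⟨H1, H2⟩ := ih (base.set c.toNat (base.getD c.toNat 0 + 1)) hlen'
      (fun d hd => hc d (List.mem_cons_of_mem _ hd))
    refine ⟨H1, fun j hj => ?_⟩
    rw [H2 j hj, List.countP_cons]
    have hset : (base.set c.toNat (base.getD c.toNat 0 + 1)).getD j 0
        = if c.toNat = j then base.getD j 0 + 1 else base.getD j 0 := by
      simp only [List.getD_eq_getElem?_getD, List.getElem?_set, hlen]
      by_cases hccj : c.toNat = j
      · simp [hccj, hj]
      · simp [hccj]
    rw [hset]
    by_cases hccj : c.toNat = j
    · simp only [hccj, beq_self_eq_true, if_pos]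
      push_cast; ring
    · have : (c.toNat == j) = false := by simp [hccj]
      simp only [hccj, this, if_false]
      simp

-- B's prefix-array loop, fully characterized
lemma pv_cw_build (f : Int → Int) (n : Nat) :
    ((PySem.List.pyRange 0 (n : Int) 1).foldl (fun (cw : List Int × List Int) k =>
        (cw.1 ++ [PySem.List.pyGetD cw.1 k 0 + f k],
         cw.2 ++ [PySem.List.pyGetD cw.2 k 0 + f k * k])) ([0], [0]))
      = ((List.range (n + 1)).map (fun (j : Nat) => ((PySem.List.pyRange 0 (j : Int) 1).map f).sum),
         (List.range (n + 1)).map (fun (j : Nat) => ((PySem.List.pyRange 0 (j : Int) 1).map (fun k => f k * k)).sum)) := by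
  induction n with
  | zero =>
    rw [show ((0 : Nat) : Int) = 0 from rfl, PySem.List.pyRange_one_eq_nil (by omega)]
    simp [PySem.List.pyRange_one_eq_nil]
  | succ n ih =>
    have hcast : ((n + 1 : Nat) : Int) = (n : Int) + 1 := by push_cast; ring
    rw [hcast, PySem.List.pyRange_one_succ_right (by exact_mod_cast Nat.zero_le n), List.foldl_append, ih]
    simp only [List.foldl_cons, List.foldl_nil]
    have hg1 : PySem.List.pyGetD ((List.range (n + 1)).map
        (fun (j : Nat) => ((PySem.List.pyRange 0 (j : Int) 1).map f).sum)) (n : Int) 0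
        = ((PySem.List.pyRange 0 (n : Int) 1).map f).sum := by
      rw [PySem.List.pyGetD_natCast, List.getD_eq_getElem _ _ (by simp)]
      simp
    have hg2 : PySem.List.pyGetD ((List.range (n + 1)).map
        (fun (j : Nat) => ((PySem.List.pyRange 0 (j : Int) 1).map (fun k => f k * k)).sum)) (n : Int) 0
        = ((PySem.List.pyRange 0 (n : Int) 1).map (fun k => f k * k)).sum := by
      rw [PySem.List.pyGetD_natCast, List.getD_eq_getElem _ _ (by simp)]
      simp
    rw [hg1, hg2]
    have hsum1 : ((PySem.List.pyRange 0 ((n + 1 : Nat) : Int) 1).map f).sum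
        = ((PySem.List.pyRange 0 (n : Int) 1).map f).sum + f (n : Int) := by
      rw [hcast, PySem.List.pyRange_one_succ_right (by exact_mod_cast Nat.zero_le n)]
      simp
    have hsum2 : ((PySem.List.pyRange 0 ((n + 1 : Nat) : Int) 1).map (fun k => f k * k)).sum
        = ((PySem.List.pyRange 0 (n : Int) 1).map (fun k => f k * k)).sum + f (n : Int) * (n : Int) := by
      rw [hcast, PySem.List.pyRange_one_succ_right (by exact_mod_cast Nat.zero_le n)]
      simp
    refine Prod.ext ?_ ?_
    · simp only [List.range_succ (n := n + 1), List.map_append, List.map_cons, List.map_nil]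
      rw [hsum1]
    · simp only [List.range_succ (n := n + 1), List.map_append, List.map_cons, List.map_nil]
      rw [hsum2]

lemma pv_cnt_read (text : String) (hdc : ∀ c ∈ text.toList, c.toNat < 127)
    (k : Int) (hk0 : 0 ≤ k) (hk : k < 127) :
    PySem.List.pyGetD (pvCntD text) k 0 = pvCnt (pvOrd text) k := by
  obtain ⟨hlen, hget⟩ := pv_cnt_fold text.toList (List.replicate 127 0) (by simp) hdc
  have hD : pvCntD text
      = text.toList.foldl (fun a c =>
          a.set c.toNat (PySem.List.pyGetD a (c.toNat : Int) 0 + 1)) (List.replicate 127 (0 : Int)) := rfl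
  have hrep : (List.replicate 127 (0 : Int)).getD k.toNat 0 = 0 := by
    rw [List.getD_eq_getElem?_getD, List.getElem?_replicate]
    split <;> simp
  rw [hD, show k = ((k.toNat : Nat) : Int) by omega, PySem.List.pyGetD_natCast,
    hget k.toNat (by omega), hrep]
  unfold pvCnt pvOrd
  rw [pv_count_map]
  simp

lemma pv_CW_eq (text : String) :
    pvCWD text
      = ((List.range 128).map (fun (j : Nat) =>
            ((PySem.List.pyRange 0 (j : Int) 1).map (fun k => PySem.List.pyGetD (pvCntD text) k 0)).sum),
         (List.range 128).map (fun (j : Nat) =>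
            ((PySem.List.pyRange 0 (j : Int) 1).map
              (fun k => PySem.List.pyGetD (pvCntD text) k 0 * k)).sum)) := by
  have h := pv_cw_build (fun k => PySem.List.pyGetD (pvCntD text) k 0) 127
  norm_num at h
  exact h

lemma pv_read_C (text : String) (hdc : ∀ c ∈ text.toList, c.toNat < 127)
    (t : Int) (h0 : 0 ≤ t) (h7 : t ≤ 127) :
    PySem.List.pyGetD (pvCWD text).1 t 0 = pvS (pvOrd text) t := by
  rw [pv_CW_eq]
  rw [show t = ((t.toNat : Nat) : Int) by omega, PySem.List.pyGetD_natCast,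
    List.getD_eq_getElem _ _ (by simp; omega)]
  simp only [List.getElem_map, List.getElem_range]
  unfold pvS
  apply congrArg
  apply List.map_congr_left
  intro k hkmem
  have hb := (PySem.List.mem_pyRange_one).1 hkmem
  exact pv_cnt_read text hdc k (by omega) (by omega)

lemma pv_read_W (text : String) (hdc : ∀ c ∈ text.toList, c.toNat < 127)
    (t : Int) (h0 : 0 ≤ t) (h7 : t ≤ 127) :
    PySem.List.pyGetD (pvCWD text).2 t 0 = pvT (pvOrd text) t := by
  rw [pv_CW_eq]
  rw [show t = ((t.toNat : Nat) : Int) by omega, PySem.List.pyGetD_natCast,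
    List.getD_eq_getElem _ _ (by simp; omega)]
  simp only [List.getElem_map, List.getElem_range]
  unfold pvT
  apply congrArg
  apply List.map_congr_left
  intro k hkmem
  have hb := (PySem.List.mem_pyRange_one).1 hkmem
  rw [pv_cnt_read text hdc k (by omega) (by omega)]

-- the two per-pair variance computations agree
lemma pv_var_eq (text : String) (hdc : ∀ c ∈ text.toList, c.toNat < 127)
    (x y : Int) (hx : 0 ≤ x) (hxy : x < y) (hy : y < 127) :
    ((pvHistD text).items.map (fun kv => min (kv.2 * |kv.1 - x|) (kv.2 * |kv.1 - y|))).sum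
      = (x * PySem.List.pyGetD (pvCWD text).1 x 0 - PySem.List.pyGetD (pvCWD text).2 x 0)
        + (PySem.List.pyGetD (pvCWD text).2 (PySem.Int.floordiv (x + y) 2 + 1) 0
            - PySem.List.pyGetD (pvCWD text).2 x 0
            - x * (PySem.List.pyGetD (pvCWD text).1 (PySem.Int.floordiv (x + y) 2 + 1) 0
                - PySem.List.pyGetD (pvCWD text).1 x 0))
        + (y * (PySem.List.pyGetD (pvCWD text).1 y 0
                - PySem.List.pyGetD (pvCWD text).1 (PySem.Int.floordiv (x + y) 2 + 1) 0)
            - (PySem.List.pyGetD (pvCWD text).2 y 0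
                - PySem.List.pyGetD (pvCWD text).2 (PySem.Int.floordiv (x + y) 2 + 1) 0))
        + (PySem.List.pyGetD (pvCWD text).2 127 0 - PySem.List.pyGetD (pvCWD text).2 y 0
            - y * (PySem.List.pyGetD (pvCWD text).1 127 0 - PySem.List.pyGetD (pvCWD text).1 y 0)) := by
  have hm0 : x ≤ PySem.Int.floordiv (x + y) 2 ∧ PySem.Int.floordiv (x + y) 2 < y := by
    unfold PySem.Int.floordiv
    rw [Int.fdiv_eq_ediv]
    simp only [show ((0:Int) ≤ 2 ∨ (2:Int) ∣ (x + y)) from Or.inl (by omega), if_pos]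
    omega
  rw [pv_read_C text hdc x (by omega) (by omega), pv_read_W text hdc x (by omega) (by omega),
      pv_read_C text hdc (PySem.Int.floordiv (x + y) 2 + 1) (by omega) (by omega),
      pv_read_W text hdc (PySem.Int.floordiv (x + y) 2 + 1) (by omega) (by omega),
      pv_read_C text hdc y (by omega) (by omega), pv_read_W text hdc y (by omega) (by omega),
      pv_read_C text hdc 127 (by omega) (by omega), pv_read_W text hdc 127 (by omega) (by omega)]
  rw [pv_hist_eq, PySem.Dict.items_counter, List.map_map]
  have hkeys : ∀ k ∈ pvOrd text, 0 ≤ k ∧ k < 127 := by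
    intro k hk
    obtain ⟨c, hc, rfl⟩ := List.mem_map.1 hk
    exact ⟨Int.natCast_nonneg _, by exact_mod_cast hdc c hc⟩
  rw [pv_sum_ofList (pvOrd text) _ hkeys (by
    intro k hk
    simp only [Function.comp_apply]
    rw [List.count_eq_zero.2 hk]
    simp)]
  have hcg : (PySem.List.pyRange 0 127 1).map
        ((fun kv : Int × Int => min (kv.2 * |kv.1 - x|) (kv.2 * |kv.1 - y|)) ∘
          (fun k => (k, ((pvOrd text).count k : Int))))
      = (PySem.List.pyRange 0 127 1).map
        (fun k => min (pvCnt (pvOrd text) k * |k - x|) (pvCnt (pvOrd text) k * |k - y|)) := rfl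
  rw [hcg, pv_varA_closed (pvOrd text) x y _ hx hxy hy rfl]

-- guarded scan over the full range = unguarded scan over the upper part
lemma pv_inner_loop (x : Int) (hx : 0 ≤ x) (hx7 : x < 127)
    (fA fB : (Int × (Int × Int)) → Int → (Int × (Int × Int)))
    (hAB : ∀ s y, x < y → y < 127 → fA s y = fB s y) (s : Int × (Int × Int)) :
    (PySem.List.pyRange 0 127 1).foldl (fun s y => if x < y then fA s y else s) s
      = (PySem.List.pyRange (x + 1) 127 1).foldl fB s := by
  rw [PySem.List.pyRange_one_append 0 (x + 1) 127 (by omega) (by omega), List.foldl_append]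
  have h1 : (PySem.List.pyRange 0 (x + 1) 1).foldl (fun s y => if x < y then fA s y else s) s = s := by
    have h2 : (PySem.List.pyRange 0 (x + 1) 1).foldl (fun s y => if x < y then fA s y else s) s
        = (PySem.List.pyRange 0 (x + 1) 1).foldl (fun s _ => s) s := by
      apply PySem.List.foldl_congr_mem
      intro acc y hy
      have := (PySem.List.mem_pyRange_one).1 hy
      rw [if_neg (by omega)]
    rw [h2, PySem.List.foldl_ignore]
  rw [h1]
  apply PySem.List.foldl_congr_mem
  intro acc y hy
  have := (PySem.List.mem_pyRange_one).1 hy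
  rw [if_pos (by omega)]
  exact hAB _ _ (by omega) (by omega)


-- ===== VERDICT (by name: the statement is the Claim_ definition above) =====
theorem findTwoAverages_spec : Claim_equal_findTwoAverages := by
  intro text hdom
  unfold Dom_findTwoAverages pvDomStr at hdom
  unfold Spec_findTwoAverages
  have hdc : ∀ c ∈ text.toList, c.toNat < 127 := by
    intro c hcmem
    have h := List.all_eq_true.1 hdom c hcmem
    unfold pvDomChar at h
    simp only [Bool.or_eq_true, Bool.and_eq_true, decide_eq_true_eq, beq_iff_eq] at h
    omega
  have hA : findTwoAverages text = pySnd ((PySem.List.pyRange 0 127 1).foldl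
      (fun (s : Int × (Int × Int)) x =>
        (PySem.List.pyRange 0 127 1).foldl (fun (s : Int × (Int × Int)) y =>
          if x < y then
            let variance := ((pvHistD text).items.map
                (fun kv => min (kv.2 * |kv.1 - x|) (kv.2 * |kv.1 - y|))).sum
            if variance < s.1 then (variance, (x, y)) else s
          else s) s) ((99999999999 : Int), ((0 : Int), (0 : Int)))) := rfl
  have hB : findTwoAverages_alt text = pySnd ((PySem.List.pyRange 0 127 1).foldl
      (fun (s : Int × (Int × Int)) x =>
        (PySem.List.pyRange (x + 1) 127 1).foldl (fun (s : Int × (Int × Int)) y =>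
          let m := PySem.Int.floordiv (x + y) 2
          let variance :=
            (x * PySem.List.pyGetD (pvCWD text).1 x 0 - PySem.List.pyGetD (pvCWD text).2 x 0)
            + (PySem.List.pyGetD (pvCWD text).2 (m + 1) 0 - PySem.List.pyGetD (pvCWD text).2 x 0
                - x * (PySem.List.pyGetD (pvCWD text).1 (m + 1) 0 - PySem.List.pyGetD (pvCWD text).1 x 0))
            + (y * (PySem.List.pyGetD (pvCWD text).1 y 0 - PySem.List.pyGetD (pvCWD text).1 (m + 1) 0)
                - (PySem.List.pyGetD (pvCWD text).2 y 0 - PySem.List.pyGetD (pvCWD text).2 (m + 1) 0))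
            + (PySem.List.pyGetD (pvCWD text).2 127 0 - PySem.List.pyGetD (pvCWD text).2 y 0
                - y * (PySem.List.pyGetD (pvCWD text).1 127 0 - PySem.List.pyGetD (pvCWD text).1 y 0))
          if variance < s.1 then (variance, (x, y)) else s) s)
      ((99999999999 : Int), ((0 : Int), (0 : Int)))) := rfl
  rw [hA, hB]
  apply congrArg pySnd
  apply PySem.List.foldl_congr_mem
  intro s x hxmem
  have hxb := (PySem.List.mem_pyRange_one).1 hxmem
  apply pv_inner_loop x (by omega) (by omega)
  intro s' y hxy hy7
  simp only [pv_var_eq text hdc x y (by omega) hxy hy7]
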